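-- pv_equiv track=rewrite | github.com/derekgliwa/adventofcode2023 | dec7/part2.py | convert_to_decimal
-- ===== SOURCE A (Python) =====
-- def convert_to_decimal(hand):
--   vals = {
--     'A': 14,
--     'K': 13,
--     'Q': 12,
--     'T': 11,
--     '9': 10,
--     '8': 9,
--     '7': 8,
--     '6': 7,
--     '5': 6,
--     '4': 5,
--     '3': 4,
--     '2': 3,
--     '1': 2,
--     'J': 1
--   }
--   val = 0
--   for i,c in enumerate(reversed(hand)):
--     val = val + vals[c] * 14**i
--   return val
-- ===== SOURCE B (Python) =====
-- ORDER = "J123456789TQKA"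
--
-- def convert_to_decimal(hand):
--   if hand == "":
--     return 0
--   return convert_to_decimal(hand[:-1]) * 14 + ORDER.index(hand[-1]) + 1
-- ===== Notes on version B (the rewrite author's own statement) =====
-- stated objective: idiomatic
-- what changed: Replaces the reversed-enumerate loop with per-digit 14**i exponentiation by a structural recursion on the hand's last character (Horner step val*14 + digit), with the card value read off as position+1 in an ordered string instead of a dict.
import Mathlib
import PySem

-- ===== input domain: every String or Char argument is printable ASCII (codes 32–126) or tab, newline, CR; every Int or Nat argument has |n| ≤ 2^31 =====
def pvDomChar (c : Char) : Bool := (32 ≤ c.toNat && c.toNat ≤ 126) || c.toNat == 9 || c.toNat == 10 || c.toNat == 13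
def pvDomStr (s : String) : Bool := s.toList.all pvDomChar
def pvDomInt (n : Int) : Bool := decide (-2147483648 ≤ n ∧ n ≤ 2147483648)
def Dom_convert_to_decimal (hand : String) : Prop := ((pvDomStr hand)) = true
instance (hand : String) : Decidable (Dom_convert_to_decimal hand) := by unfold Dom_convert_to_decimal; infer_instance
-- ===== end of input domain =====

-- B replaces the powers-of-14 loop by a structural recursion on the last character (Horner step),
-- reading the card value as position+1 in an ordered card string instead of a dict (idiomatic; same values).
-- Pre_ excludes hands with a character outside the card set, on which A raises KeyError (B raises ValueError).

-- ===== PORT A =====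
-- the vals dict, as a total lookup; characters outside its keys (Python KeyError) are excluded by Pre_
def pvVals (c : Char) : Int :=
  if c = 'A' then 14 else if c = 'K' then 13 else if c = 'Q' then 12 else
  if c = 'T' then 11 else if c = '9' then 10 else if c = '8' then 9 else
  if c = '7' then 8 else if c = '6' then 7 else if c = '5' then 6 else
  if c = '4' then 5 else if c = '3' then 4 else if c = '2' then 3 else
  if c = '1' then 2 else if c = 'J' then 1 else 0

def convert_to_decimal (hand : String) : Int :=
  (PySem.List.enumerate hand.toList.reverse).foldl
    (fun val ic => val + pvVals ic.2 * (14 : Int) ^ ic.1.toNat) 0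

-- ===== PORT B =====
-- ORDER.index(c) + 1; missing characters (Python ValueError) are excluded by Pre_
def pvOrderIdx (c : Char) : Int :=
  (((PySem.List.index? "J123456789TQKA".toList c).map (Int.ofNat)).getD (-1)) + 1

-- recursion on the hand's LAST character (hand[:-1] / hand[-1]); realised as structural
-- recursion on the reversed character list, whose head is the hand's last character
def pvBRev : List Char → Int
  | [] => 0
  | c :: t => pvBRev t * 14 + pvOrderIdx c

def convert_to_decimal_alt (hand : String) : Int :=
  pvBRev hand.toList.reverse

-- ===== PRECONDITION & SPEC =====
-- Pre_ excludes exactly the hands with a character not among the card characters: there A raises KeyError.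
def Pre_convert_to_decimal (hand : String) : Prop :=
  hand.toList.all (fun c => c ∈ ['A','K','Q','T','9','8','7','6','5','4','3','2','1','J']) = true
instance (hand : String) : Decidable (Pre_convert_to_decimal hand) := by unfold Pre_convert_to_decimal; infer_instance
def pvWitness_convert_to_decimal : String := "AKQJT"

def Spec_convert_to_decimal (hand : String) (out : Int) : Prop := out = convert_to_decimal_alt hand
instance (hand : String) (out : Int) : Decidable (Spec_convert_to_decimal hand out) := by unfold Spec_convert_to_decimal; infer_instance

-- ===== CLAIM (what is proved, stated in full; the proofs are below) =====
def Claim_equal_convert_to_decimal : Prop := ∀ (hand : String), Dom_convert_to_decimal hand → Pre_convert_to_decimal hand → Spec_convert_to_decimal hand (convert_to_decimal hand)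

-- ===== LEMMAS AND PROOFS =====

-- A's loop as a function of the character list.
def pvA (l : List Char) : Int :=
  (PySem.List.enumerate l.reverse).foldl (fun val ic => val + pvVals ic.2 * (14 : Int) ^ ic.1.toNat) 0

lemma pvA_foldl_acc (m : List (Int × Char)) (a : Int) :
    m.foldl (fun val ic => val + pvVals ic.2 * (14 : Int) ^ ic.1.toNat) a
      = a + m.foldl (fun val ic => val + pvVals ic.2 * (14 : Int) ^ ic.1.toNat) 0 := by
  induction m generalizing a with
  | nil => simp
  | cons p t ih =>
    simp only [List.foldl_cons]
    rw [ih, ih (0 + _)]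
    ring

lemma pvA_cons (c : Char) (t : List Char) :
    pvA (c :: t) = pvA t + pvVals c * (14 : Int) ^ t.length := by
  unfold pvA
  simp only [List.reverse_cons, PySem.List.enumerate_append, List.foldl_append]
  rw [pvA_foldl_acc]
  simp [PySem.List.enumerate]

-- on card characters, B's position-based value agrees with A's dict value
lemma pvIdx_eq_vals (c : Char)
    (h : c ∈ ['A','K','Q','T','9','8','7','6','5','4','3','2','1','J']) :
    pvOrderIdx c = pvVals c := by
  fin_cases h <;> decide

-- appending a (most-significant) character on the right of the reversed list
lemma pvBRev_append (m : List Char) (c : Char) :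
    pvBRev (m ++ [c]) = pvBRev m + pvOrderIdx c * (14 : Int) ^ m.length := by
  induction m with
  | nil => simp [pvBRev]
  | cons d m' ih =>
    simp only [List.cons_append, pvBRev, ih, List.length_cons]
    ring

lemma pvA_eq_pvBRev (l : List Char)
    (h : ∀ c ∈ l, c ∈ ['A','K','Q','T','9','8','7','6','5','4','3','2','1','J']) :
    pvA l = pvBRev l.reverse := by
  induction l with
  | nil => simp [pvA, pvBRev]
  | cons c t ih =>
    rw [pvA_cons, List.reverse_cons, pvBRev_append,
      ih (fun x hx => h x (List.mem_cons_of_mem _ hx)),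
      pvIdx_eq_vals c (h c (List.mem_cons_self))]
    simp

-- ===== VERDICT (by name: the statement is the Claim_ definition above) =====
theorem convert_to_decimal_spec : Claim_equal_convert_to_decimal := by
  intro hand _ hpre
  unfold Spec_convert_to_decimal convert_to_decimal convert_to_decimal_alt
  have h : ∀ c ∈ hand.toList, c ∈ ['A','K','Q','T','9','8','7','6','5','4','3','2','1','J'] := by
    intro c hc
    have := List.all_eq_true.mp hpre c hc
    simpa using this
  exact pvA_eq_pvBRev hand.toList h
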